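-- pv_equiv track=rewrite | github.com/Pearl-K/Algorithm-Baekjoon-Programmers- | 프로그래머스/2/150368. 이모티콘 할인행사/이모티콘 할인행사.py | solution
-- ===== SOURCE A (Python) =====
-- from itertools import product
--
-- def solution(users, emoticons):
--     discounts = [10, 20, 30, 40]
--     answer = [0, 0]
--
--     for dis_comb in product(discounts, repeat=len(emoticons)):
--         plus_member = 0
--         total_price = 0
--
--         for user in users: # 비율, 가격
--             max_port, max_price = user
--             user_price = 0
--
--             for i, dis_port in enumerate(dis_comb):
--                 if dis_port >= max_port:
--                     user_price += emoticons[i]*(100-dis_port)//100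
--
--             if user_price >= max_price:
--                 plus_member += 1
--             else:
--                 total_price += user_price
--
--         if plus_member > answer[0]:
--             answer = [plus_member, total_price]
--         elif plus_member == answer[0]:
--             answer[1] = max(answer[1], total_price)
--
--     return answer
-- ===== SOURCE B (Python) =====
-- def solution(users, emoticons):
--     discounts = [10, 20, 30, 40]
--     n = len(emoticons)
--
--     def leaf(sums, best):
--         plus = 0
--         total = 0
--         for user, s in zip(users, sums):
--             if s >= user[1]:
--                 plus += 1
--             else:
--                 total += s
--         if plus > best[0]:
--             return (plus, total)
--         elif plus == best[0]:
--             return (best[0], max(best[1], total))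
--         return best
--
--     def dfs(i, sums, best):
--         if i == n:
--             return leaf(sums, best)
--         e = emoticons[i]
--         for dis in discounts:
--             best = dfs(i + 1,
--                        [s + (e * (100 - dis) // 100 if dis >= user[0] else 0)
--                         for user, s in zip(users, sums)],
--                        best)
--         return best
--
--     b = dfs(0, [0] * len(users), (0, 0))
--     return [b[0], b[1]]
-- ===== Notes on version B (the rewrite author's own statement) =====
-- stated objective: faster
-- what changed: Replaces the flat itertools.product enumeration (which recomputes every user's price from scratch for each combination) with a recursive DFS over emoticon indices that passes down per-user accumulated price sums, so each leaf only scans the users once with ready sums.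
import Mathlib
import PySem

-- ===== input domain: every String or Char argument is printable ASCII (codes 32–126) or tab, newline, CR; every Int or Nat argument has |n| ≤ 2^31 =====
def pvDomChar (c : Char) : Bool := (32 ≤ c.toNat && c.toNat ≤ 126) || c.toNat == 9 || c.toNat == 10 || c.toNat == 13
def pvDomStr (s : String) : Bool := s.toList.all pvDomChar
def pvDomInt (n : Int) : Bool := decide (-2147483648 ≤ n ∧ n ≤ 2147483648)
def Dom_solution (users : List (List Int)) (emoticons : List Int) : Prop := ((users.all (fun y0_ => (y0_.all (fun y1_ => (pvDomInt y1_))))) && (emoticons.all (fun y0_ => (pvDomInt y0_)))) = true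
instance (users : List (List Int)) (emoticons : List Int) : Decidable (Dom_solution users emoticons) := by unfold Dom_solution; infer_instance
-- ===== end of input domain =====

-- B replaces A's flat itertools.product enumeration by a DFS over emoticon indices that
-- passes down per-user accumulated price sums (faster: leaves reuse the accumulated sums).


-- ===== PORT A =====
-- itertools.product([10,20,30,40], repeat=n), in Python's order (first coordinate slowest)
def aProd (n : Nat) : List (List Int) :=
  match n with
  | 0 => [[]]
  | n + 1 => ([10, 20, 30, 40] : List Int).flatMap (fun d => (aProd n).map (d :: ·))

-- "for i, dis_port in enumerate(dis_comb): if dis_port >= max_port: user_price += emoticons[i]*(100-dis_port)//100"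
-- enumerate indices are nonnegative and < emoticons.length here, so emoticons.getD i 0 is exact for emoticons[i]
def aUserPrice (emoticons : List Int) (maxPort : Int) : Nat → List Int → Int → Int
  | i, d :: ds, acc =>
      aUserPrice emoticons maxPort (i + 1) ds
        (if d ≥ maxPort then acc + PySem.Int.floordiv (emoticons.getD i 0 * (100 - d)) 100 else acc)
  | _, [], acc => acc

-- one iteration of the outer loop: compute (plus_member, total_price) for dis_comb, then update answer
def aStep (users : List (List Int)) (emoticons : List Int) (comb : List Int) (answer : Int × Int) : Int × Int :=
  let pt := users.foldl
    (fun (pt : Int × Int) user =>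
      let maxPort := user.headD 0          -- user[0]; Pre_ guarantees user has length 2
      let maxPrice := (user.drop 1).headD 0 -- user[1]
      let userPrice := aUserPrice emoticons maxPort 0 comb 0
      if userPrice ≥ maxPrice then (pt.1 + 1, pt.2) else (pt.1, pt.2 + userPrice))
    (0, 0)
  if pt.1 > answer.1 then pt
  else if pt.1 = answer.1 then (answer.1, max answer.2 pt.2)
  else answer

def solution (users : List (List Int)) (emoticons : List Int) : List Int :=
  let res := (aProd emoticons.length).foldl (fun ans comb => aStep users emoticons comb ans) (0, 0)
  [res.1, res.2]

-- ===== PORT B =====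
-- the list comprehension building the new per-user sums for a chosen discount d of emoticon e
def bAddSums (users : List (List Int)) (sums : List Int) (e : Int) (d : Int) : List Int :=
  match users, sums with
  | u :: us, s :: ss =>
      (s + if d ≥ u.headD 0 then PySem.Int.floordiv (e * (100 - d)) 100 else 0) :: bAddSums us ss e d
  | _, _ => []

-- the leaf: compute (plus, total) from the accumulated sums, then fold into best
def bLeaf (users : List (List Int)) (sums : List Int) (best : Int × Int) : Int × Int :=
  let pt := (users.zip sums).foldl
    (fun (pt : Int × Int) (p : List Int × Int) =>
      if p.2 ≥ (p.1.drop 1).headD 0 then (pt.1 + 1, pt.2) else (pt.1, pt.2 + p.2))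
    (0, 0)
  if pt.1 > best.1 then pt
  else if pt.1 = best.1 then (best.1, max best.2 pt.2)
  else best

-- dfs(i, sums, best): 'i → i+1 over emoticons' ported as structural recursion on the remaining emoticons
def bDfs (users : List (List Int)) (ems : List Int) (sums : List Int) (best : Int × Int) : Int × Int :=
  match ems with
  | [] => bLeaf users sums best
  | e :: rest =>
      ([10, 20, 30, 40] : List Int).foldl (fun b d => bDfs users rest (bAddSums users sums e d) b) best

def solution_alt (users : List (List Int)) (emoticons : List Int) : List Int :=
  let b := bDfs users emoticons (List.replicate users.length 0) (0, 0)
  [b.1, b.2]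

-- ===== PRECONDITION & SPEC =====
-- Python A raises ValueError unpacking 'max_port, max_price = user' unless every user has exactly 2 entries
def Pre_solution (users : List (List Int)) (emoticons : List Int) : Prop :=
  ∀ u ∈ users, u.length = 2
instance (users : List (List Int)) (emoticons : List Int) : Decidable (Pre_solution users emoticons) := by
  unfold Pre_solution; infer_instance

def pvWitness_solution : List (List Int) × List Int := ([[40, 100], [25, 1000]], [400, 4200])

def Spec_solution (users : List (List Int)) (emoticons : List Int) (out : List Int) : Prop := out = solution_alt users emoticons
instance (users : List (List Int)) (emoticons : List Int) (out : List Int) : Decidable (Spec_solution users emoticons out) := by unfold Spec_solution; infer_instance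

-- ===== CLAIM (what is proved, stated in full; the proofs are below) =====
def Claim_equal_solution : Prop := ∀ (users : List (List Int)) (emoticons : List Int), Dom_solution users emoticons → Pre_solution users emoticons → Spec_solution users emoticons (solution users emoticons)

-- ===== LEMMAS AND PROOFS =====

-- the total contribution of a chosen discount combination to one user with threshold p
def pvContrib (ems comb : List Int) (p : Int) : Int :=
  match ems, comb with
  | e :: es, d :: ds =>
      (if d ≥ p then PySem.Int.floordiv (e * (100 - d)) 100 else 0) + pvContrib es ds p
  | _, _ => 0

-- sums with the full contribution of (ems, comb) added pointwise per user
def pvAddAll (users : List (List Int)) (sums : List Int) (ems comb : List Int) : List Int :=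
  match users, sums with
  | u :: us, s :: ss => (s + pvContrib ems comb (u.headD 0)) :: pvAddAll us ss ems comb
  | _, _ => []

lemma pvContrib_nil (ems : List Int) (p : Int) : pvContrib ems [] p = 0 := by
  cases ems <;> rfl

lemma pvAddAll_nil (users : List (List Int)) (sums : List Int) (ems : List Int)
    (h : sums.length = users.length) : pvAddAll users sums ems [] = sums := by
  induction users generalizing sums with
  | nil => cases sums with
    | nil => rfl
    | cons s ss => simp at h
  | cons u us ih =>
    cases sums with
    | nil => simp at h
    | cons s ss =>
      simp [pvAddAll, pvContrib_nil, ih ss (by simpa using h)]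

lemma pvAddAll_addSums (users : List (List Int)) (sums : List Int) (e d : Int) (rest comb : List Int) :
    pvAddAll users (bAddSums users sums e d) rest comb = pvAddAll users sums (e :: rest) (d :: comb) := by
  induction users generalizing sums with
  | nil => cases sums <;> rfl
  | cons u us ih =>
    cases sums with
    | nil => rfl
    | cons s ss => simp [bAddSums, pvAddAll, pvContrib, ih ss]; ring

lemma bAddSums_length (users : List (List Int)) (sums : List Int) (e d : Int)
    (h : sums.length = users.length) : (bAddSums users sums e d).length = users.length := by
  induction users generalizing sums with
  | nil => cases sums <;> simp_all [bAddSums]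
  | cons u us ih =>
    cases sums with
    | nil => simp at h
    | cons s ss => simp [bAddSums, ih ss (by simpa using h)]

lemma foldl_flatMap_eq {α β γ : Type} (l : List α) (g : α → List β) (f : γ → β → γ) (b : γ) :
    (l.flatMap g).foldl f b = l.foldl (fun b a => (g a).foldl f b) b := by
  induction l generalizing b with
  | nil => rfl
  | cons x xs ih => simp [List.flatMap_cons, List.foldl_append, ih]

-- the DFS equals the fold of the leaf over all combinations, with sums extended by each combination
lemma bDfs_eq_foldl (users : List (List Int)) (ems : List Int) :
    ∀ (sums : List Int), sums.length = users.length → ∀ (best : Int × Int),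
      bDfs users ems sums best =
        (aProd ems.length).foldl (fun b comb => bLeaf users (pvAddAll users sums ems comb) b) best := by
  induction ems with
  | nil =>
    intro sums h best
    simp [bDfs, aProd, pvAddAll_nil users sums [] h]
  | cons e rest ih =>
    intro sums h best
    show ([10, 20, 30, 40] : List Int).foldl (fun b d => bDfs users rest (bAddSums users sums e d) b) best = _
    rw [show aProd (e :: rest).length
          = ([10, 20, 30, 40] : List Int).flatMap (fun d => (aProd rest.length).map (d :: ·)) from rfl,
        foldl_flatMap_eq]
    apply PySem.List.foldl_congr_mem
    intro b d _
    rw [ih (bAddSums users sums e d) (bAddSums_length users sums e d h) b, List.foldl_map]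
    apply PySem.List.foldl_congr_mem
    intro b' comb _
    rw [pvAddAll_addSums]

-- every combination produced by product has length n
lemma length_of_mem_aProd (n : Nat) (comb : List Int) (h : comb ∈ aProd n) : comb.length = n := by
  induction n generalizing comb with
  | zero => simp [aProd] at h; simp [h]
  | succ n ih =>
    simp [aProd] at h
    rcases h with ⟨c, hc, rfl⟩ | ⟨c, hc, rfl⟩ | ⟨c, hc, rfl⟩ | ⟨c, hc, rfl⟩ <;> simp [ih c hc]

-- A's enumerate-and-index inner loop equals the structural contribution sum
lemma aUserPrice_eq_contrib (ems : List Int) (p : Int) :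
    ∀ (comb : List Int) (i : Nat) (acc : Int), i + comb.length = ems.length →
      aUserPrice ems p i comb acc = acc + pvContrib (ems.drop i) comb p := by
  intro comb
  induction comb with
  | nil => intro i acc _; simp [aUserPrice, pvContrib_nil]
  | cons d ds ih =>
    intro i acc h
    have hi : i < ems.length := by simp at h; omega
    have hdrop : ems.drop i = ems[i] :: ems.drop (i + 1) := List.drop_eq_getElem_cons hi
    rw [show aUserPrice ems p i (d :: ds) acc
          = aUserPrice ems p (i + 1) ds
              (if d ≥ p then acc + PySem.Int.floordiv (ems.getD i 0 * (100 - d)) 100 else acc) from rfl,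
        ih (i + 1) _ (by simp at h ⊢; omega), hdrop]
    show _ = acc + pvContrib (ems[i] :: ems.drop (i+1)) (d :: ds) p
    rw [List.getD_eq_getElem ems 0 hi]
    simp only [pvContrib]
    split_ifs <;> ring

-- per combination, A's from-scratch step equals B's leaf on the accumulated sums
lemma aStep_eq_bLeaf (emoticons comb : List Int) (hlen : comb.length = emoticons.length) :
    ∀ (users : List (List Int)) (ans : Int × Int),
      aStep users emoticons comb ans
        = bLeaf users (pvAddAll users (List.replicate users.length 0) emoticons comb) ans := by
  have hup : ∀ p : Int, aUserPrice emoticons p 0 comb 0 = pvContrib emoticons comb p := by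
    intro p
    simpa using aUserPrice_eq_contrib emoticons p comb 0 0 (by simpa using hlen)
  have inner : ∀ (users : List (List Int)) (pt : Int × Int),
      users.foldl
        (fun (pt : Int × Int) user =>
          if aUserPrice emoticons (user.headD 0) 0 comb 0 ≥ (user.drop 1).headD 0
          then (pt.1 + 1, pt.2) else (pt.1, pt.2 + aUserPrice emoticons (user.headD 0) 0 comb 0)) pt
      = (users.zip (pvAddAll users (List.replicate users.length 0) emoticons comb)).foldl
          (fun (pt : Int × Int) (p : List Int × Int) =>
            if p.2 ≥ (p.1.drop 1).headD 0 then (pt.1 + 1, pt.2) else (pt.1, pt.2 + p.2)) pt := by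
    intro users
    induction users with
    | nil => intro pt; rfl
    | cons u us ih =>
      intro pt
      simp only [List.length_cons, List.replicate_succ, pvAddAll, List.zip_cons_cons, List.foldl_cons]
      rw [← ih]
      congr 1
      simp [hup]
  intro users ans
  unfold aStep bLeaf
  simp only []
  rw [inner users (0, 0)]

-- ===== VERDICT (by name: the statement is the Claim_ definition above) =====
theorem solution_spec : Claim_equal_solution := by
  intro users emoticons _ _
  show solution users emoticons = solution_alt users emoticons
  unfold solution solution_alt
  rw [bDfs_eq_foldl users emoticons (List.replicate users.length 0) (by simp) (0, 0)]
  have h : (aProd emoticons.length).foldl (fun ans comb => aStep users emoticons comb ans) (0, 0)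
      = (aProd emoticons.length).foldl
          (fun b comb => bLeaf users (pvAddAll users (List.replicate users.length 0) emoticons comb) b) (0, 0) := by
    apply PySem.List.foldl_congr_mem
    intro ans comb hc
    exact aStep_eq_bLeaf emoticons comb
      (by rw [length_of_mem_aProd emoticons.length comb hc]) users ans
  simp only [h]
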